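-- pv_equiv track=rewrite | github.com/laurensgithub1/Projecten | Periode 2/Programmeren/Opdracht 1/dobbel - easy lege functies 1.py | bereken_score_easy
-- ===== SOURCE A (Python) =====
-- def bereken_score_easy(lijst):
--     score=0
--     for getal in lijst:
--         if getal==1:
--             getal=0
--         if getal==6:
--             getal=12
--         score=score+getal
--     return score
-- ===== SOURCE B (Python) =====
-- def bereken_score_easy(lijst):
--     return sum(lijst) - lijst.count(1) + 6 * lijst.count(6)
-- ===== Notes on version B (the rewrite author's own statement) =====
-- stated objective: simpler
-- what changed: Replaces the branching accumulation loop by a closed arithmetic formula: plain sum minus the number of 1s plus six per 6.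
import Mathlib
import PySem

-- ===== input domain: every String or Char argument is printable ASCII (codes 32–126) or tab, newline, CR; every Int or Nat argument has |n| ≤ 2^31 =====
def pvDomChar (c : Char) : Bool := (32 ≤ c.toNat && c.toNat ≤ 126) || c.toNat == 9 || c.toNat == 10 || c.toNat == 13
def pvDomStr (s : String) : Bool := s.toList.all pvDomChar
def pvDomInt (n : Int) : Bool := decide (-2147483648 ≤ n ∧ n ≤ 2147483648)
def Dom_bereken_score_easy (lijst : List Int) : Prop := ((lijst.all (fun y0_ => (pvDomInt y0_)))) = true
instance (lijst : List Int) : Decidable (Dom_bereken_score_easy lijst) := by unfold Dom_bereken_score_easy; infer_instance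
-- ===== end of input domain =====

-- B replaces A's branching accumulation loop with the closed formula sum - count(1) + 6*count(6) (objective: simpler).

-- ===== PORT A =====
def bereken_score_easy (lijst : List Int) : Int :=
  lijst.foldl (fun score getal =>
    let getal := if getal = 1 then 0 else getal
    let getal := if getal = 6 then 12 else getal
    score + getal) 0

-- ===== PORT B =====
def bereken_score_easy_alt (lijst : List Int) : Int :=
  lijst.sum - (PySem.List.count lijst 1 : Int) + 6 * (PySem.List.count lijst 6 : Int)

-- ===== PRECONDITION & SPEC =====
def Spec_bereken_score_easy (lijst : List Int) (out : Int) : Prop := out = bereken_score_easy_alt lijst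
instance (lijst : List Int) (out : Int) : Decidable (Spec_bereken_score_easy lijst out) := by unfold Spec_bereken_score_easy; infer_instance

-- ===== CLAIM (what is proved, stated in full; the proofs are below) =====
def Claim_equal_bereken_score_easy : Prop := ∀ (lijst : List Int), Dom_bereken_score_easy lijst → Spec_bereken_score_easy lijst (bereken_score_easy lijst)

-- ===== LEMMAS AND PROOFS =====
theorem bse_foldl_acc (lijst : List Int) (a : Int) :
    lijst.foldl (fun score getal =>
      let getal := if getal = 1 then 0 else getal
      let getal := if getal = 6 then 12 else getal
      score + getal) a
    = a + lijst.sum - (PySem.List.count lijst 1 : Int) + 6 * (PySem.List.count lijst 6 : Int) := by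
  induction lijst generalizing a with
  | nil => simp [PySem.List.count]
  | cons x xs ih =>
    simp only [List.foldl_cons, ih, List.sum_cons, PySem.List.count_eq, List.count_cons]
    by_cases h1 : x = 1 <;> by_cases h6 : x = 6 <;>
      simp [h1, h6] <;> omega

-- ===== VERDICT (by name: the statement is the Claim_ definition above) =====
theorem bereken_score_easy_spec : Claim_equal_bereken_score_easy := by
  intro lijst _
  unfold Spec_bereken_score_easy bereken_score_easy bereken_score_easy_alt
  simpa using bse_foldl_acc lijst 0
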